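-- pv_equiv track=rewrite | github.com/KingICCrab/pim_mapper | validation/dram/analyze_decomposed.py | compute_h_direction_switches
-- ===== SOURCE A (Python) =====
-- def compute_h_direction_switches(P_l3, R_l2, H_step, R_step, H_tile, block_h):
--     """
--     计算 H 方向的 switches (row block 变化次数)
--
--     访问 h 位置: h_start = p * H_step + r * R_step
--     访问 h_block: h_start // block_h
--
--     当 h_block 变化时,就有一次 switch
--     """
--     prev_h_block = -1
--     switches = 0
--
--     for p in range(P_l3):
--         for r in range(R_l2):
--             h_start = p * H_step + r * R_step
--             h_block = h_start // block_h
--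
--             # 检查是否 crossing
--             h_end = h_start + H_tile - 1
--             h_block_end = h_end // block_h
--             num_h_blocks = h_block_end - h_block + 1
--
--             # 每个访问的 h_block 都可能是一次 switch
--             for hb in range(h_block, h_block_end + 1):
--                 if hb != prev_h_block:
--                     switches += 1
--                     prev_h_block = hb
--
--     return switches
-- ===== SOURCE B (Python) =====
-- def compute_h_direction_switches(P_l3, R_l2, H_step, R_step, H_tile, block_h):
--     # Single flattened loop: one iteration per access k, (p, r) = divmod(k, R_l2);
--     # each access contributes its whole block run [lo..hi] in O(1) arithmetic
--     # (hi - lo + 1 switches, minus 1 if its first block equals the previous block).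
--     n = max(P_l3, 0) * max(R_l2, 0)
--     prev = -1
--     switches = 0
--     for k in range(n):
--         p, r = divmod(k, R_l2)
--         h_start = p * H_step + r * R_step
--         lo = h_start // block_h
--         hi = (h_start + H_tile - 1) // block_h
--         if lo <= hi:
--             switches += hi - lo + 1 - (lo == prev)
--             prev = hi
--     return switches
-- ===== Notes on version B (the rewrite author's own statement) =====
-- stated objective: faster
-- what changed: A's three nested loops (p, r, and a scan over every h block of the access) become one flattened loop over a single access index k with (p, r) = divmod(k, R_l2), and the inner per-block scan is replaced by a closed-form O(1) contribution: hi-lo+1 switches minus 1 when the run's first block equals the previous block.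
import Mathlib
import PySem

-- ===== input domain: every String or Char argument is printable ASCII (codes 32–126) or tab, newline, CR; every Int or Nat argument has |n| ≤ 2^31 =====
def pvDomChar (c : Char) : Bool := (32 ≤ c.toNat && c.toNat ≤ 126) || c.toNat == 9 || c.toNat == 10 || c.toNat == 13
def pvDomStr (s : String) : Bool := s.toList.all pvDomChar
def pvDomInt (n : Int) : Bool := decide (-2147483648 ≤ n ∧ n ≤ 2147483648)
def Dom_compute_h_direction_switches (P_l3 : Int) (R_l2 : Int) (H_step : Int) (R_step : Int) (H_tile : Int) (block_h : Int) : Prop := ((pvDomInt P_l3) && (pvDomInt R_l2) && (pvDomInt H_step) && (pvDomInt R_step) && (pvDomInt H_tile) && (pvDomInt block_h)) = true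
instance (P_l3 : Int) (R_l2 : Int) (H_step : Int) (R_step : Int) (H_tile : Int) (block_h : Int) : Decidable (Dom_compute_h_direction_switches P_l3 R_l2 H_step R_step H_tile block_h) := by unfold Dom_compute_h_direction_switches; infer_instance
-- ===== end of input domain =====

-- B flattens A's three nested loops into ONE loop over a single access index (p, r recovered
-- by divmod) and replaces the inner per-block scan by a closed-form O(1) contribution.

-- ===== PORT A =====
def compute_h_direction_switches (P_l3 : Int) (R_l2 : Int) (H_step : Int) (R_step : Int) (H_tile : Int) (block_h : Int) : Int :=
  -- state (switches, prev_h_block); init switches = 0, prev_h_block = -1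
  (List.foldl (fun (st : Int × Int) (p : Int) =>
      List.foldl (fun (st : Int × Int) (r : Int) =>
        let h_start := p * H_step + r * R_step
        let h_block := PySem.Int.floordiv h_start block_h
        let h_end := h_start + H_tile - 1
        let h_block_end := PySem.Int.floordiv h_end block_h
        -- num_h_blocks is computed but unused in the Python source
        List.foldl (fun (st : Int × Int) (hb : Int) =>
            if hb ≠ st.2 then (st.1 + 1, hb) else st)
          st (PySem.List.pyRange h_block (h_block_end + 1) 1))
        st (PySem.List.pyRange 0 R_l2 1))
    ((0 : Int), (-1 : Int)) (PySem.List.pyRange 0 P_l3 1)).1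

-- ===== PORT B =====
def compute_h_direction_switches_alt (P_l3 : Int) (R_l2 : Int) (H_step : Int) (R_step : Int) (H_tile : Int) (block_h : Int) : Int :=
  -- single loop over k in range(n), n = max(P_l3,0)*max(R_l2,0); state (switches, prev); init (0, -1)
  (List.foldl (fun (st : Int × Int) (k : Int) =>
      let p := PySem.Int.floordiv k R_l2
      let r := PySem.Int.mod k R_l2
      let h_start := p * H_step + r * R_step
      let lo := PySem.Int.floordiv h_start block_h
      let hi := PySem.Int.floordiv (h_start + H_tile - 1) block_h
      if lo ≤ hi then (st.1 + hi - lo + 1 - (if lo = st.2 then 1 else 0), hi) else st)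
    ((0 : Int), (-1 : Int)) (PySem.List.pyRange 0 (max P_l3 0 * max R_l2 0) 1)).1

-- ===== PRECONDITION & SPEC =====
-- Pre_ excludes only block_h = 0 with both loop bounds positive: there Python A's
-- '// block_h' raises ZeroDivisionError (B raises too); A returns nowhere outside Pre_.
def Pre_compute_h_direction_switches (P_l3 : Int) (R_l2 : Int) (H_step : Int) (R_step : Int) (H_tile : Int) (block_h : Int) : Prop :=
  block_h ≠ 0 ∨ P_l3 ≤ 0 ∨ R_l2 ≤ 0
instance (P_l3 : Int) (R_l2 : Int) (H_step : Int) (R_step : Int) (H_tile : Int) (block_h : Int) : Decidable (Pre_compute_h_direction_switches P_l3 R_l2 H_step R_step H_tile block_h) := by unfold Pre_compute_h_direction_switches; infer_instance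
def pvWitness_compute_h_direction_switches : Int × Int × Int × Int × Int × Int := (3, 2, 5, 2, 7, 4)
def Spec_compute_h_direction_switches (P_l3 : Int) (R_l2 : Int) (H_step : Int) (R_step : Int) (H_tile : Int) (block_h : Int) (out : Int) : Prop := out = compute_h_direction_switches_alt P_l3 R_l2 H_step R_step H_tile block_h
instance (P_l3 : Int) (R_l2 : Int) (H_step : Int) (R_step : Int) (H_tile : Int) (block_h : Int) (out : Int) : Decidable (Spec_compute_h_direction_switches P_l3 R_l2 H_step R_step H_tile block_h out) := by unfold Spec_compute_h_direction_switches; infer_instance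

-- ===== CLAIM (what is proved, stated in full; the proofs are below) =====
def Claim_equal_compute_h_direction_switches : Prop := ∀ (P_l3 : Int) (R_l2 : Int) (H_step : Int) (R_step : Int) (H_tile : Int) (block_h : Int), Dom_compute_h_direction_switches P_l3 R_l2 H_step R_step H_tile block_h → Pre_compute_h_direction_switches P_l3 R_l2 H_step R_step H_tile block_h → Spec_compute_h_direction_switches P_l3 R_l2 H_step R_step H_tile block_h (compute_h_direction_switches P_l3 R_l2 H_step R_step H_tile block_h)

-- ===== LEMMAS AND PROOFS =====

-- A's inner block loop in closed form: over the run lo..hi of consecutive blocks each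
-- block differs from its predecessor, so it adds hi-lo+1, minus 1 when the first block
-- equals the incoming prev, and leaves prev at hi.
theorem inner_loop_closed (n : Nat) : ∀ (lo hi s prev : Int), (hi + 1 - lo).toNat = n →
    List.foldl (fun (st : Int × Int) (hb : Int) => if hb ≠ st.2 then (st.1 + 1, hb) else st)
      (s, prev) (PySem.List.pyRange lo (hi + 1) 1)
    = if lo ≤ hi then (s + hi - lo + 1 - (if lo = prev then 1 else 0), hi) else (s, prev) := by
  induction n with
  | zero =>
    intro lo hi s prev h
    rw [show PySem.List.pyRange lo (hi + 1) 1 = [] from by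
      simp [PySem.List.pyRange_one, show (hi + 1 - lo).toNat = 0 from h]]
    simp [show ¬ lo ≤ hi by omega]
  | succ n ih =>
    intro lo hi s prev h
    have hle : lo ≤ hi := by omega
    rw [PySem.List.pyRange_one_cons (by omega : lo < hi + 1)]
    simp only [List.foldl_cons]
    by_cases hp : lo = prev
    · subst hp
      simp only [ne_eq, not_true_eq_false, if_false]
      rw [ih (lo + 1) hi s lo (by omega)]
      split_ifs with h1 h2 <;> simp_all [Prod.ext_iff] <;> omega
    · rw [if_pos (by exact fun hh => hp hh)]
      rw [ih (lo + 1) hi (s + 1) lo (by omega)]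
      split_ifs with h1 h2 <;> simp_all [Prod.ext_iff] <;> omega

-- folding a function that never changes the state leaves it unchanged
theorem foldl_id_of {σ : Type} (f : σ → Int → σ) (h : ∀ st x, f st x = st) :
    ∀ (l : List Int) (st : σ), List.foldl f st l = st := by
  intro l
  induction l with
  | nil => intro st; rfl
  | cons a l ih => intro st; rw [List.foldl_cons, h st a]; exact ih st

-- one R-chunk of the flattened range, folded with (k / R, k % R), equals the plain
-- inner fold over pyRange 0 R with p = m
theorem chunk_fold {σ : Type} (g : Int → Int → σ → σ) (m R : Int) (hR : 0 < R) :
    ∀ (j : Nat) (st : σ), (j : Int) ≤ R →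
    List.foldl (fun st k => g (PySem.Int.floordiv k R) (PySem.Int.mod k R) st) st
      (PySem.List.pyRange (m * R + (R - j)) (m * R + R) 1)
    = List.foldl (fun st r => g m r st) st (PySem.List.pyRange (R - j) R 1) := by
  intro j
  induction j with
  | zero =>
    intro st _
    rw [PySem.List.pyRange_one_eq_nil (by omega), PySem.List.pyRange_one_eq_nil (by omega)]
    rfl
  | succ j ih =>
    intro st hj
    push_cast at hj ⊢
    have ha : (0 : Int) ≤ R - ((j : Int) + 1) := by omega
    have hlt : R - ((j : Int) + 1) < R := by omega
    rw [PySem.List.pyRange_one_cons (by omega : m * R + (R - ((j : Int) + 1)) < m * R + R),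
        PySem.List.pyRange_one_cons (by omega : R - ((j : Int) + 1) < R)]
    simp only [List.foldl_cons]
    have hdiv : PySem.Int.floordiv (m * R + (R - ((j : Int) + 1))) R = m := by
      rw [PySem.Int.floordiv_eq_iff_of_pos hR]
      constructor <;> nlinarith
    have hmod : PySem.Int.mod (m * R + (R - ((j : Int) + 1))) R = R - ((j : Int) + 1) := by
      have := PySem.Int.floordiv_mul_add_mod (m * R + (R - ((j : Int) + 1))) R
      rw [hdiv] at this; omega
    rw [hdiv, hmod]
    have := ih (g m (R - ((j : Int) + 1)) st) (by omega)
    rw [show m * R + (R - ((j : Int) + 1)) + 1 = m * R + (R - (j : Int)) by ring,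
        show R - ((j : Int) + 1) + 1 = R - (j : Int) by ring]
    exact this

-- flattening: a fold over range(P*R) with (k / R, k % R) is the nested double fold
theorem flat_fold {σ : Type} (g : Int → Int → σ → σ) (R : Int) (hR : 0 < R) :
    ∀ (n : Nat) (st : σ),
    List.foldl (fun st k => g (PySem.Int.floordiv k R) (PySem.Int.mod k R) st) st
      (PySem.List.pyRange 0 ((n : Int) * R) 1)
    = List.foldl (fun st p => List.foldl (fun st r => g p r st) st (PySem.List.pyRange 0 R 1)) st
      (PySem.List.pyRange 0 (n : Int) 1) := by
  intro n
  induction n with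
  | zero =>
    intro st
    push_cast
    rw [zero_mul, PySem.List.pyRange_one_eq_nil (le_refl 0)]
    rfl
  | succ n ih =>
    intro st
    push_cast
    have h1 : (0 : Int) ≤ (n : Int) * R := by positivity
    have h2 : (n : Int) * R ≤ ((n : Int) + 1) * R := by nlinarith
    rw [PySem.List.pyRange_one_append 0 ((n : Int) * R) (((n : Int) + 1) * R) h1 h2,
        PySem.List.pyRange_one_succ_right (by omega : (0 : Int) ≤ (n : Int))]
    rw [List.foldl_append, List.foldl_append, ih st]
    simp only [List.foldl_cons, List.foldl_nil]
    have := chunk_fold g (n : Int) R hR R.toNat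
      (List.foldl (fun st p => List.foldl (fun st r => g p r st) st (PySem.List.pyRange 0 R 1)) st
        (PySem.List.pyRange 0 (n : Int) 1)) (by omega)
    rw [show R - (R.toNat : Int) = 0 by omega, add_zero] at this
    rw [show ((n : Int) + 1) * R = (n : Int) * R + R by ring, this]

theorem compute_h_direction_switches_spec : Claim_equal_compute_h_direction_switches := by
  intro P R H_step R_step H_tile block_h _ _
  unfold Spec_compute_h_direction_switches compute_h_direction_switches compute_h_direction_switches_alt
  -- rewrite A's inner block loop into its closed form
  have hA : (List.foldl (fun (st : Int × Int) (p : Int) =>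
      List.foldl (fun (st : Int × Int) (r : Int) =>
        let h_start := p * H_step + r * R_step
        let h_block := PySem.Int.floordiv h_start block_h
        let h_end := h_start + H_tile - 1
        let h_block_end := PySem.Int.floordiv h_end block_h
        List.foldl (fun (st : Int × Int) (hb : Int) =>
            if hb ≠ st.2 then (st.1 + 1, hb) else st)
          st (PySem.List.pyRange h_block (h_block_end + 1) 1))
        st (PySem.List.pyRange 0 R 1))
    ((0 : Int), (-1 : Int)) (PySem.List.pyRange 0 P 1))
    = (List.foldl (fun (st : Int × Int) (p : Int) =>
      List.foldl (fun (st : Int × Int) (r : Int) =>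
        let lo := PySem.Int.floordiv (p * H_step + r * R_step) block_h
        let hi := PySem.Int.floordiv (p * H_step + r * R_step + H_tile - 1) block_h
        if lo ≤ hi then (st.1 + hi - lo + 1 - (if lo = st.2 then 1 else 0), hi) else st)
        st (PySem.List.pyRange 0 R 1))
    ((0 : Int), (-1 : Int)) (PySem.List.pyRange 0 P 1)) := by
    congr 1
    funext st p
    congr 1
    funext st r
    obtain ⟨s, prev⟩ := st
    exact inner_loop_closed _ _ _ _ _ rfl
  rw [hA]
  by_cases hR : 0 < R
  · by_cases hP : 0 < P
    · -- both positive: flatten with n = P.toNat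
      have hc : ((P.toNat : Int)) = P := by omega
      have hn : max P 0 * max R 0 = (P.toNat : Int) * R := by
        rw [max_eq_left (le_of_lt hP), max_eq_left (le_of_lt hR), hc]
      rw [hn]
      rw [flat_fold (fun p r (st : Int × Int) =>
            let lo := PySem.Int.floordiv (p * H_step + r * R_step) block_h
            let hi := PySem.Int.floordiv (p * H_step + r * R_step + H_tile - 1) block_h
            if lo ≤ hi then (st.1 + hi - lo + 1 - (if lo = st.2 then 1 else 0), hi) else st)
          R hR P.toNat ((0 : Int), (-1 : Int))]
      rw [hc]
    · -- outer loop empty on both sides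
      have hn : max P 0 * max R 0 = 0 := by
        rw [max_eq_right (by omega : P ≤ 0)]; ring
      rw [hn, PySem.List.pyRange_one_eq_nil (by omega : P ≤ 0),
          PySem.List.pyRange_one_eq_nil (le_refl (0 : Int))]
      rfl
  · -- inner range empty: A's outer fold never changes the state; B's range is empty
    have hR' : R ≤ 0 := by omega
    have hn : max P 0 * max R 0 = 0 := by
      rw [max_eq_right hR']; ring
    rw [hn, PySem.List.pyRange_one_eq_nil (le_refl (0 : Int)),
        foldl_id_of _ (fun st p => by rw [PySem.List.pyRange_one_eq_nil hR']; rfl)]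
    rfl
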